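-- pv_equiv track=rewrite | github.com/MrBrantCode/unitest_baseline | mut_generate/mist_train_cf/cf_96755/solution.py | count_max_occurrences
-- ===== SOURCE A (Python) =====
-- def count_max_occurrences(arr):
--     if not arr or not arr[0]:
--         return 0
--
--     max_value = float('-inf')
--     max_count = 0
--
--     for row in arr:
--         for num in row:
--             if num > max_value:
--                 max_value = num
--                 max_count = 1
--             elif num == max_value:
--                 max_count += 1
--
--     return max_count
-- ===== SOURCE B (Python) =====
-- def count_max_occurrences(arr):
--     if not arr or not arr[0]:
--         return 0
--     flat = [num for row in arr for num in row]
--     m = flat[0]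
--     for num in flat[1:]:
--         if num > m:
--             m = num
--     return sum(1 for num in flat if num == m)
-- ===== Notes on version B (the rewrite author's own statement) =====
-- stated objective: simpler
-- what changed: A tracks a running max and a count that resets in one fused nested scan starting from -inf; B flattens the grid once, takes the max by a plain fold from the first element, then counts occurrences of that max in a second pass.
import Mathlib
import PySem

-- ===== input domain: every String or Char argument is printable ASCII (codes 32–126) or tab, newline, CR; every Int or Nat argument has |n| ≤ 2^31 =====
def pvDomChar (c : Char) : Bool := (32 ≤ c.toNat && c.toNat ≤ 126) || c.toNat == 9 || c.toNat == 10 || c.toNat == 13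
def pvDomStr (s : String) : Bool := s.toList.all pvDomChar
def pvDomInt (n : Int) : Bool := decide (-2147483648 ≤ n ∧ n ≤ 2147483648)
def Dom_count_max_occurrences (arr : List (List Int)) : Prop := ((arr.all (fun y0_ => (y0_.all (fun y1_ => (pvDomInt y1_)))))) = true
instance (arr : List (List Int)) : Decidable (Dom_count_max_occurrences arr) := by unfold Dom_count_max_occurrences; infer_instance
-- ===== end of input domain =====

-- B flattens the grid, takes the max with a plain fold from the first element, then counts it in a second pass (simpler two-pass decomposition; same return value as A).


-- ===== PORT A =====
-- A's running state: (max_value, max_count); Python's float('-inf') sentinel is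
-- represented exactly by `none` (every int compares greater than it, never equal to it).
def pvStepA (st : Option Int × Int) (num : Int) : Option Int × Int :=
  match st with
  | (none, _) => (some num, 1)
  | (some m, c) => if num > m then (some num, 1) else if num = m then (some m, c + 1) else (some m, c)

def count_max_occurrences (arr : List (List Int)) : Int :=
  if arr = [] ∨ arr.headD [] = [] then 0
  else (arr.foldl (fun st row => row.foldl pvStepA st) (none, 0)).2

-- ===== PORT B =====
def pvMaxStep (m num : Int) : Int := if num > m then num else m

def count_max_occurrences_alt (arr : List (List Int)) : Int :=
  if arr = [] ∨ arr.headD [] = [] then 0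
  else
    let flat := arr.flatMap (fun row => row)
    let m := (flat.drop 1).foldl pvMaxStep (flat.headD 0)
    ((flat.filter (fun num => num = m)).length : Int)

-- ===== PRECONDITION & SPEC =====
def Spec_count_max_occurrences (arr : List (List Int)) (out : Int) : Prop := out = count_max_occurrences_alt arr
instance (arr : List (List Int)) (out : Int) : Decidable (Spec_count_max_occurrences arr out) := by unfold Spec_count_max_occurrences; infer_instance

-- ===== CLAIM (what is proved, stated in full; the proofs are below) =====
def Claim_equal_count_max_occurrences : Prop := ∀ (arr : List (List Int)), Dom_count_max_occurrences arr → Spec_count_max_occurrences arr (count_max_occurrences arr)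

-- ===== LEMMAS AND PROOFS =====

-- A's nested fold over rows is the fold over the flattened list.
lemma foldl_rows (arr : List (List Int)) (st : Option Int × Int) :
    arr.foldl (fun st row => row.foldl pvStepA st) st
      = (arr.flatMap (fun row => row)).foldl pvStepA st := by
  induction arr generalizing st with
  | nil => rfl
  | cons r rs ih => simp [List.flatMap_cons, List.foldl_append, ih]

-- the running max never decreases
lemma le_foldl_max (t : List Int) (m : Int) : m ≤ t.foldl pvMaxStep m := by
  induction t generalizing m with
  | nil => simp
  | cons y u ih =>
    simp only [List.foldl_cons, pvMaxStep]
    split_ifs with h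
    · exact le_trans (le_of_lt h) (ih y)
    · exact ih m

-- Invariant of A's scan, started from a seen maximum m with count c.
lemma stepA_inv (xs : List Int) (m : Int) (c : Int) :
    xs.foldl pvStepA (some m, c)
      = (some (xs.foldl pvMaxStep m),
         (if xs.foldl pvMaxStep m = m then c else 0)
           + ((xs.filter (fun num => num = xs.foldl pvMaxStep m)).length : Int)) := by
  induction xs generalizing m c with
  | nil => simp
  | cons x t ih =>
    rw [List.foldl_cons, List.foldl_cons]
    by_cases hx : x > m
    · have hm : pvMaxStep m x = x := by simp [pvMaxStep, hx]
      have hstep : pvStepA (some m, c) x = (some x, 1) := by simp [pvStepA, hx]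
      have hMne : t.foldl pvMaxStep x ≠ m := by
        have := le_foldl_max t x; intro h; omega
      rw [hstep, ih, hm, List.filter_cons]
      simp only [Prod.mk.injEq, true_and, if_neg hMne, decide_eq_true_eq]
      by_cases hxM : x = t.foldl pvMaxStep x
      · simp only [if_pos hxM.symm, if_pos hxM, List.length_cons]
        push_cast; omega
      · simp only [if_neg (fun h : t.foldl pvMaxStep x = x => hxM h.symm), if_neg hxM]
    · have hm : pvMaxStep m x = m := by simp [pvMaxStep, hx]
      have hMm := le_foldl_max t m
      by_cases he : x = m
      · have hstep : pvStepA (some m, c) x = (some m, c + 1) := by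
          simp [pvStepA, he]
        rw [hstep, ih, hm, List.filter_cons]
        simp only [Prod.mk.injEq, true_and, decide_eq_true_eq]
        by_cases hM : t.foldl pvMaxStep m = m
        · simp only [if_pos hM, if_pos (he.trans hM.symm), List.length_cons]
          push_cast; omega
        · rw [if_neg hM, if_neg hM,
              if_neg (fun h : x = List.foldl pvMaxStep m t => hM (h.symm.trans he))]
      · have hstep : pvStepA (some m, c) x = (some m, c) := by
          simp [pvStepA, hx, he]
        have hxm : x < m := lt_of_le_of_ne (not_lt.mp hx) he
        have hxM : x ≠ t.foldl pvMaxStep m := by intro h; omega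
        rw [hstep, ih, hm, List.filter_cons]
        simp only [decide_eq_true_eq, if_neg hxM]

-- ===== VERDICT (by name: the statement is the Claim_ definition above) =====
theorem count_max_occurrences_spec : Claim_equal_count_max_occurrences := by
  intro arr _
  unfold Spec_count_max_occurrences count_max_occurrences count_max_occurrences_alt
  split_ifs with hg
  · rfl
  · rw [not_or] at hg
    obtain ⟨h1, h2⟩ := hg
    cases arr with
    | nil => exact absurd rfl h1
    | cons r rs =>
      cases r with
      | nil => simp at h2
      | cons x t =>
        rw [foldl_rows]
        have hflat : ((x :: t) :: rs).flatMap (fun row => row)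
            = x :: (t ++ rs.flatMap (fun row => row)) := by
          simp [List.flatMap_cons]
        rw [hflat]
        simp only [List.headD_cons, List.drop_one, List.tail_cons, List.foldl_cons]
        rw [show pvStepA (none, 0) x = (some x, 1) from rfl, stepA_inv, List.filter_cons]
        simp only [decide_eq_true_eq]
        by_cases hxM : x = (t ++ rs.flatMap (fun row => row)).foldl pvMaxStep x
        · simp only [if_pos hxM.symm, if_pos hxM, List.length_cons]
          push_cast; omega
        · simp only
            [if_neg (fun h : (t ++ rs.flatMap (fun row => row)).foldl pvMaxStep x = x => hxM h.symm),
             if_neg hxM, zero_add]
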